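-- pv_equiv track=rewrite | github.com/Yuvix25/pytov_old | pytov.py | getStrings
-- ===== SOURCE A (Python) =====
-- def getStrings(text):
--
--     # all strings regex: (\"(.|[\r\n][^\"])*?\")|\'(.|[\r\n][^\"])*?\'
--
--     # get all strings positions
--
--     strings = []
--     wasQuoteStart = False
--     lastQuote = ""
--     firstQuote = 0
--
--     for i in range(len(text)):
--
--         if (text[i] == "'" and wasQuoteStart and lastQuote == "'") or (text[i] == '"' and wasQuoteStart and lastQuote == '"'):
--             strings.append([firstQuote, i])
--             wasQuoteStart = False
--
--         elif (text[i] == "'" or text[i] == '"') and not wasQuoteStart: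
--             lastQuote = text[i]
--             wasQuoteStart = True
--             firstQuote = i
--
--     return strings
-- ===== SOURCE B (Python) =====
-- def getStrings(text):
--     # index-driven walk: jump to the matching closer with str.find instead of
--     # tracking quote state per character
--     strings = []
--     i = 0
--     n = len(text)
--     while i < n:
--         c = text[i]
--         if c == "'" or c == '"':
--             j = text.find(c, i + 1)
--             if j == -1:
--                 break
--             strings.append([i, j])
--             i = j + 1
--         else:
--             i += 1
--     return strings
-- ===== Notes on version B (the rewrite author's own statement) =====
-- stated objective: simpler
-- what changed: Replaces the per-character state machine (wasQuoteStart/lastQuote/firstQuote flags over every index) by an index-driven while loop that, on seeing a quote, jumps straight to the matching closer with str.find and skips past it.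
import Mathlib
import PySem

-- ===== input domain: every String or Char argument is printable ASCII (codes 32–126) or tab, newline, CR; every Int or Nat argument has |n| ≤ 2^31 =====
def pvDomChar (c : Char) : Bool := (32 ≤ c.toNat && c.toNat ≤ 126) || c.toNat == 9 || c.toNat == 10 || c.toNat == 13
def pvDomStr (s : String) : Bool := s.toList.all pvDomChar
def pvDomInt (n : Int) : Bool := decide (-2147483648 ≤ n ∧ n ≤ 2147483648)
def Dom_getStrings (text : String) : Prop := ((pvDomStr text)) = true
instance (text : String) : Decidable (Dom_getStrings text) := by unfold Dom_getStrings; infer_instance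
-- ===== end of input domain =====

-- B replaces A's per-character quote-state machine by an index walk that jumps to the
-- matching closing quote with str.find; objective: simpler (drops the state flags).


-- ===== PORT A =====
-- Python's lastQuote is a one-character string; it is modelled as a Char. Its initial
-- value "" is never a quote, so the non-quote placeholder ' ' is faithful (the only
-- comparisons are against "'" and '"').
def getStringsStep (st : List (List Int) × Bool × Char × Int) (p : Int × Char) :
    List (List Int) × Bool × Char × Int :=
  let strings := st.1
  let wasQuoteStart := st.2.1
  let lastQuote := st.2.2.1
  let firstQuote := st.2.2.2
  let i := p.1
  let c := p.2
  if (c = '\'' ∧ wasQuoteStart = true ∧ lastQuote = '\'') ∨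
     (c = '"' ∧ wasQuoteStart = true ∧ lastQuote = '"') then
    (strings ++ [[firstQuote, i]], false, lastQuote, firstQuote)
  else if (c = '\'' ∨ c = '"') ∧ wasQuoteStart = false then
    (strings, true, c, i)
  else
    (strings, wasQuoteStart, lastQuote, firstQuote)

-- 'for i in range(len(text)): … text[i] …' visits exactly the (index, char) pairs
def getStrings (text : String) : List (List Int) :=
  ((PySem.List.enumerate text.toList 0).foldl getStringsStep ([], false, ' ', 0)).1

-- ===== PORT B =====
-- termination helper for the while loop: the find result is ≥ i+1 when ≠ -1
theorem pvFindFrom_ge (cs : List Char) (c : Char) (i : Nat) (hi : i < cs.length)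
    (hj : PySem.Chars.findFrom cs [c] ((i : Int) + 1) none ≠ -1) :
    i < (PySem.Chars.findFrom cs [c] ((i : Int) + 1) none).toNat := by
  have hcast : ((i : Int) + 1) = ((i + 1 : Nat) : Int) := by push_cast; ring
  rw [hcast] at hj ⊢
  have hs := PySem.Chars.findFrom_natCast_spec cs [c] (i + 1) (by omega) hj
  omega

def getStringsAltGo (cs : List Char) (i : Nat) : List (List Int) :=
  if h : i < cs.length then
    let c := cs[i]
    if c = '\'' ∨ c = '"' then
      let j := PySem.Chars.findFrom cs [c] ((i : Int) + 1) none
      if hj : j = -1 then []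
      else [(i : Int), j] :: getStringsAltGo cs (j.toNat + 1)
    else getStringsAltGo cs (i + 1)
  else []
termination_by cs.length - i
decreasing_by
  · have := pvFindFrom_ge cs cs[i] i h hj
    omega
  · omega

def getStrings_alt (text : String) : List (List Int) :=
  getStringsAltGo text.toList 0

-- ===== PRECONDITION & SPEC =====
def Spec_getStrings (text : String) (out : List (List Int)) : Prop := out = getStrings_alt text
instance (text : String) (out : List (List Int)) : Decidable (Spec_getStrings text out) := by unfold Spec_getStrings; infer_instance

-- ===== CLAIM (what is proved, stated in full; the proofs are below) =====
def Claim_equal_getStrings : Prop := ∀ (text : String), Dom_getStrings text → Spec_getStrings text (getStrings text)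

-- ===== LEMMAS AND PROOFS =====

-- What A's state machine does from index i while inside a q-quoted string opened at
-- firstQuote = f: scan for the next occurrence of q, close there, continue as B.
def pvCloseFrom (cs : List Char) (q : Char) (f : Int) (i : Nat) : List (List Int) :=
  if h : i < cs.length then
    if cs[i] = q then [f, (i : Int)] :: getStringsAltGo cs (i + 1)
    else pvCloseFrom cs q f (i + 1)
  else []
termination_by cs.length - i

-- [q] is a prefix of cs.drop i exactly when cs[i] = q
theorem pvSingleton_prefix_drop (cs : List Char) (q : Char) (i : Nat) :
    [q] <+: cs.drop i ↔ ∃ h : i < cs.length, cs[i] = q := by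
  constructor
  · rintro ⟨t, ht⟩
    have hlen : i < cs.length := by
      by_contra h
      have : cs.drop i = [] := List.drop_eq_nil_of_le (by omega)
      simp [this] at ht
    refine ⟨hlen, ?_⟩
    rw [List.drop_eq_getElem_cons hlen] at ht
    exact (List.cons.injEq _ _ _ _ ▸ ht).1.symm
  · rintro ⟨h, hq⟩
    rw [List.drop_eq_getElem_cons h, hq]
    exact ⟨_, rfl⟩

-- if q does not occur at or after i, the close scan returns []
theorem pvCloseFrom_of_not_mem (cs : List Char) (q : Char) (f : Int) (i : Nat)
    (h : ∀ k, i ≤ k → (hk : k < cs.length) → cs[k] ≠ q) :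
    pvCloseFrom cs q f i = [] := by
  rw [pvCloseFrom]
  split
  · next hi =>
    rw [if_neg (h i le_rfl hi)]
    exact pvCloseFrom_of_not_mem cs q f (i + 1) (fun k hk hkl => h k (by omega) hkl)
  · rfl
termination_by cs.length - i

-- if the first occurrence of q at or after i is at j, the close scan closes there
theorem pvCloseFrom_of_first (cs : List Char) (q : Char) (f : Int) (i j : Nat)
    (hij : i ≤ j) (hjl : j < cs.length) (hq : cs[j] = q)
    (hmin : ∀ k, i ≤ k → k < j → (hk : k < cs.length) → cs[k] ≠ q) :
    pvCloseFrom cs q f i = [f, (j : Int)] :: getStringsAltGo cs (j + 1) := by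
  rw [pvCloseFrom, dif_pos (by omega)]
  by_cases hiq : i = j
  · subst hiq; rw [if_pos hq]
  · rw [if_neg (hmin i le_rfl (by omega) (by omega))]
    exact pvCloseFrom_of_first cs q f (i + 1) j (by omega) hjl hq
      (fun k hk hkj hkl => hmin k (by omega) hkj hkl)
termination_by j - i

-- the close scan IS B's find-and-jump step
theorem pvCloseFrom_eq_find (cs : List Char) (q : Char) (f : Int) (k : Nat)
    (hk : k ≤ cs.length) :
    pvCloseFrom cs q f k =
      (if _hj : PySem.Chars.findFrom cs [q] ((k : Nat) : Int) none = -1 then []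
       else [f, PySem.Chars.findFrom cs [q] ((k : Nat) : Int) none] ::
         getStringsAltGo cs ((PySem.Chars.findFrom cs [q] ((k : Nat) : Int) none).toNat + 1)) := by
  split
  · next hj =>
    have hnot := (PySem.Chars.findFrom_natCast_eq_neg_one_iff cs [q] k hk).mp hj
    refine pvCloseFrom_of_not_mem cs q f k (fun m hm hml hq => hnot ?_)
    have hpre : [q] <+: cs.drop m := (pvSingleton_prefix_drop cs q m).mpr ⟨hml, hq⟩
    have hdd : cs.drop m = (cs.drop k).drop (m - k) := by
      rw [List.drop_drop]; congr 1; omega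
    rw [hdd] at hpre
    exact hpre.isInfix.trans (List.drop_suffix _ _).isInfix
  · next hj =>
    obtain ⟨hle, hpre, hmin⟩ := PySem.Chars.findFrom_natCast_spec cs [q] k hk hj
    set jz := PySem.Chars.findFrom cs [q] ((k : Nat) : Int) none with hjz
    have hpos : 0 ≤ jz := le_trans (Int.natCast_nonneg k) hle
    set j := jz.toNat with hjdef
    have hjeq : jz = (j : Int) := (Int.toNat_of_nonneg hpos).symm
    obtain ⟨hjl, hq⟩ := (pvSingleton_prefix_drop cs q j).mp hpre
    rw [hjeq]
    exact pvCloseFrom_of_first cs q f k j (by omega) hjl hq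
      (fun m hm hmj hml hqq =>
        hmin m (by exact_mod_cast hm) (by omega) ((pvSingleton_prefix_drop cs q m).mpr ⟨hml, hqq⟩))

-- one-step evaluations of A's transition function
theorem pvStep_open (acc : List (List Int)) (l : Char) (f i : Int) (c : Char)
    (hc : c = '\'' ∨ c = '"') :
    getStringsStep (acc, false, l, f) (i, c) = (acc, true, c, i) := by
  rcases hc with h | h <;> subst h <;> simp [getStringsStep]

theorem pvStep_skip (acc : List (List Int)) (l : Char) (f i : Int) (c : Char)
    (hc : ¬(c = '\'' ∨ c = '"')) :
    getStringsStep (acc, false, l, f) (i, c) = (acc, false, l, f) := by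
  push Not at hc
  simp [getStringsStep, hc.1, hc.2]

theorem pvStep_close (acc : List (List Int)) (q : Char) (f i : Int)
    (hq : q = '\'' ∨ q = '"') :
    getStringsStep (acc, true, q, f) (i, q) = (acc ++ [[f, i]], false, q, f) := by
  rcases hq with h | h <;> subst h <;> simp [getStringsStep]

theorem pvStep_inquote_skip (acc : List (List Int)) (q : Char) (f i : Int) (c : Char)
    (hne : c ≠ q) :
    getStringsStep (acc, true, q, f) (i, c) = (acc, true, q, f) := by
  simp only [getStringsStep]
  rw [if_neg, if_neg]
  · simp
  · rintro (⟨h, _, h'⟩ | ⟨h, _, h'⟩) <;> exact hne (h.trans h'.symm)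

-- unfolding lemmas for B's scan and the close scan
theorem pvGo_quote (cs : List Char) (i : Nat) (h : i < cs.length)
    (hq : cs[i] = '\'' ∨ cs[i] = '"') :
    getStringsAltGo cs i =
      (if hj : PySem.Chars.findFrom cs [cs[i]] ((i + 1 : Nat) : Int) none = -1 then []
       else [(i : Int), PySem.Chars.findFrom cs [cs[i]] ((i + 1 : Nat) : Int) none] ::
         getStringsAltGo cs ((PySem.Chars.findFrom cs [cs[i]] ((i + 1 : Nat) : Int) none).toNat + 1)) := by
  have hcast : ((i + 1 : Nat) : Int) = (i : Int) + 1 := by push_cast; ring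
  rw [getStringsAltGo, dif_pos h, hcast]
  simp only [if_pos hq]

theorem pvGo_skip (cs : List Char) (i : Nat) (h : i < cs.length)
    (hq : ¬(cs[i] = '\'' ∨ cs[i] = '"')) :
    getStringsAltGo cs i = getStringsAltGo cs (i + 1) := by
  rw [getStringsAltGo, dif_pos h]
  simp only [if_neg hq]

theorem pvGo_end (cs : List Char) (i : Nat) (h : ¬ i < cs.length) :
    getStringsAltGo cs i = [] := by
  rw [getStringsAltGo, dif_neg h]

theorem pvClose_hit (cs : List Char) (q : Char) (f : Int) (i : Nat) (h : i < cs.length)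
    (hcq : cs[i] = q) :
    pvCloseFrom cs q f i = [f, (i : Int)] :: getStringsAltGo cs (i + 1) := by
  rw [pvCloseFrom, dif_pos h, if_pos hcq]

theorem pvClose_miss (cs : List Char) (q : Char) (f : Int) (i : Nat) (h : i < cs.length)
    (hcq : ¬ cs[i] = q) :
    pvCloseFrom cs q f i = pvCloseFrom cs q f (i + 1) := by
  rw [pvCloseFrom, dif_pos h, if_neg hcq]

theorem pvClose_end (cs : List Char) (q : Char) (f : Int) (i : Nat) (h : ¬ i < cs.length) :
    pvCloseFrom cs q f i = [] := by
  rw [pvCloseFrom, dif_neg h]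

-- main invariant: A's fold from index i, in either machine state, equals B's scan
theorem pvMain (cs : List Char) (n i : Nat) (hn : cs.length - i = n) (hi : i ≤ cs.length) :
    (∀ (acc : List (List Int)) (l : Char) (f : Int),
        ((PySem.List.enumerate (cs.drop i) (i : Int)).foldl getStringsStep (acc, false, l, f)).1
          = acc ++ getStringsAltGo cs i) ∧
    (∀ (acc : List (List Int)) (q : Char) (f : Int), (q = '\'' ∨ q = '"') →
        ((PySem.List.enumerate (cs.drop i) (i : Int)).foldl getStringsStep (acc, true, q, f)).1
          = acc ++ pvCloseFrom cs q f i) := by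
  induction n using Nat.strong_induction_on generalizing i with
  | _ n ih =>
  by_cases hlt : i < cs.length
  · have hdrop : cs.drop i = cs[i] :: cs.drop (i + 1) := List.drop_eq_getElem_cons hlt
    have hcast : ((i : Int) + 1) = ((i + 1 : Nat) : Int) := by push_cast; ring
    have henum : PySem.List.enumerate (cs.drop i) (i : Int)
        = ((i : Int), cs[i]) :: PySem.List.enumerate (cs.drop (i + 1)) ((i + 1 : Nat) : Int) := by
      rw [hdrop, PySem.List.enumerate_cons, hcast]
    have ihm := ih (cs.length - (i + 1)) (by omega) (i + 1) rfl (by omega)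
    constructor
    · intro acc l f
      rw [henum, List.foldl_cons]
      by_cases hq : cs[i] = '\'' ∨ cs[i] = '"'
      · rw [pvStep_open acc l f (i : Int) cs[i] hq, ihm.2 acc cs[i] (i : Int) hq,
          pvGo_quote cs i hlt hq, pvCloseFrom_eq_find cs cs[i] (i : Int) (i + 1) (by omega)]
      · rw [pvStep_skip acc l f (i : Int) cs[i] hq, ihm.1 acc l f, pvGo_skip cs i hlt hq]
    · intro acc q f hqq
      rw [henum, List.foldl_cons]
      by_cases hcq : cs[i] = q
      · rw [hcq, pvStep_close acc q f (i : Int) hqq, ihm.1 (acc ++ [[f, (i : Int)]]) q f,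
          pvClose_hit cs q f i hlt hcq, List.append_assoc]
        rfl
      · rw [pvStep_inquote_skip acc q f (i : Int) cs[i] hcq, ihm.2 acc q f hqq,
          pvClose_miss cs q f i hlt hcq]
  · have hdrop : cs.drop i = [] := List.drop_eq_nil_of_le (by omega)
    constructor
    · intro acc l f
      rw [hdrop, pvGo_end cs i hlt]
      simp [PySem.List.enumerate_nil]
    · intro acc q f _
      rw [hdrop, pvClose_end cs q f i hlt]
      simp [PySem.List.enumerate_nil]

-- ===== VERDICT (by name: the statement is the Claim_ definition above) =====
theorem getStrings_spec : Claim_equal_getStrings := by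
  intro text _
  unfold Spec_getStrings getStrings getStrings_alt
  have h := (pvMain text.toList (text.toList.length) 0 (by omega) (by omega)).1 [] ' ' 0
  simpa using h
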